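-- pv_equiv track=rewrite | github.com/luiscarlosgarzacisneros/EFInformatik | docs/MA/Dame3.py | evaluatepos
-- ===== SOURCE A (Python) =====
-- def evaluatepos(pos,player):
--     eval=0
--     if player==1:
--         anz_X=0
--         anz_O=0
--         anz_W=0
--         anz_M=0
--         for sl in range(len(pos)):
--             for o in range(pos[sl].count(1)):
--                 eval=eval+9
--                 anz_X+=1
--             for o in range(pos[sl].count(-1)):
--                 eval=eval-1
--                 anz_O+=1
--             for o in range(pos[sl].count(2)):
--                 eval=eval+49
--                 anz_W+=1
--             for o in range(pos[sl].count(-2)):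
--                 eval=eval-51
--                 anz_M+=1
--         if anz_X==0 and anz_W==0:
--             eval=eval-8888
--         elif anz_O and anz_M==0:
--             eval=eval+8888
--         return eval
--     elif player==-1:
--         anz_X=0
--         anz_O=0
--         anz_W=0
--         anz_M=0
--         for sl in range(len(pos)):
--             for o in range(pos[sl].count(1)):
--                 eval=eval-11
--                 anz_X+=1
--             for o in range(pos[sl].count(-1)):
--                 eval=eval+9
--                 anz_O+=1
--             for o in range(pos[sl].count(2)):
--                 eval=eval-51
--                 anz_W+=1
--             for o in range(pos[sl].count(-2)):
--                 eval=eval+49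
--                 anz_M+=1
--         if anz_X==0 and anz_W==0:
--             eval=eval+8888
--         elif anz_O and anz_M==0:
--             eval=eval-8888
--         return eval
-- ===== SOURCE B (Python) =====
-- def evaluatepos(pos, player):
--     # one pass tallying the four piece kinds, then a closed-form score per player
--     c1 = cm1 = c2 = cm2 = 0
--     for row in pos:
--         for v in row:
--             if v == 1:
--                 c1 += 1
--             elif v == -1:
--                 cm1 += 1
--             elif v == 2:
--                 c2 += 1
--             elif v == -2:
--                 cm2 += 1
--     if player == 1:
--         e = 9 * c1 - cm1 + 49 * c2 - 51 * cm2
--         if c1 == 0 and c2 == 0: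
--             e -= 8888
--         elif cm1 and cm2 == 0:
--             e += 8888
--         return e
--     elif player == -1:
--         e = -11 * c1 + 9 * cm1 - 51 * c2 + 49 * cm2
--         if c1 == 0 and c2 == 0:
--             e += 8888
--         elif cm1 and cm2 == 0:
--             e -= 8888
--         return e
-- ===== Notes on version B (the rewrite author's own statement) =====
-- stated objective: simpler
-- what changed: Replaces A's eight per-row count() scans driving unit-increment loops with a single pass over the cells tallying the four piece kinds, then computes the score by a closed-form linear expression per player.
import Mathlib
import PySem

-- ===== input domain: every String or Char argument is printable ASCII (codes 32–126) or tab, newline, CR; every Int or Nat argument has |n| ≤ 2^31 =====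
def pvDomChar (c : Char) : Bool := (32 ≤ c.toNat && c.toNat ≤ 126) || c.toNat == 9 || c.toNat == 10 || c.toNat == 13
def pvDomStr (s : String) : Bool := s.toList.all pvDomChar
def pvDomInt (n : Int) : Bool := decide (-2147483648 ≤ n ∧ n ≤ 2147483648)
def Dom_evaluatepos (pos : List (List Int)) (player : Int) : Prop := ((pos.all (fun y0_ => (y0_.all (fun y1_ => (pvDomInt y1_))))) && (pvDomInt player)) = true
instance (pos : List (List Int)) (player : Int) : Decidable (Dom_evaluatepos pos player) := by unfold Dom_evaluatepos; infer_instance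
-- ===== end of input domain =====

-- B replaces A's eight per-row count() scans feeding unit-increment loops with one pass
-- tallying the four piece kinds and a closed-form score per player (objective: simpler).


-- ===== PORT A =====
-- state (eval, anz_X, anz_O, anz_W, anz_M)
def evaluatepos (pos : List (List Int)) (player : Int) : Option Int :=
  if player == 1 then
    let s := (PySem.List.pyRange 0 (pos.length : Int) 1).foldl
      (fun (s : Int × Int × Int × Int × Int) sl =>
        let row := PySem.List.pyGetD pos sl []
        let s := (PySem.List.pyRange 0 ((PySem.List.count row 1 : Nat) : Int) 1).foldl
          (fun (t : Int × Int × Int × Int × Int) _ => (t.1 + 9, t.2.1 + 1, t.2.2.1, t.2.2.2.1, t.2.2.2.2)) s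
        let s := (PySem.List.pyRange 0 ((PySem.List.count row (-1) : Nat) : Int) 1).foldl
          (fun (t : Int × Int × Int × Int × Int) _ => (t.1 - 1, t.2.1, t.2.2.1 + 1, t.2.2.2.1, t.2.2.2.2)) s
        let s := (PySem.List.pyRange 0 ((PySem.List.count row 2 : Nat) : Int) 1).foldl
          (fun (t : Int × Int × Int × Int × Int) _ => (t.1 + 49, t.2.1, t.2.2.1, t.2.2.2.1 + 1, t.2.2.2.2)) s
        (PySem.List.pyRange 0 ((PySem.List.count row (-2) : Nat) : Int) 1).foldl
          (fun (t : Int × Int × Int × Int × Int) _ => (t.1 - 51, t.2.1, t.2.2.1, t.2.2.2.1, t.2.2.2.2 + 1)) s)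
      (0, 0, 0, 0, 0)
    some (if s.2.1 == 0 && s.2.2.2.1 == 0 then s.1 - 8888
          else if s.2.2.1 != 0 && s.2.2.2.2 == 0 then s.1 + 8888 else s.1)
  else if player == -1 then
    let s := (PySem.List.pyRange 0 (pos.length : Int) 1).foldl
      (fun (s : Int × Int × Int × Int × Int) sl =>
        let row := PySem.List.pyGetD pos sl []
        let s := (PySem.List.pyRange 0 ((PySem.List.count row 1 : Nat) : Int) 1).foldl
          (fun (t : Int × Int × Int × Int × Int) _ => (t.1 - 11, t.2.1 + 1, t.2.2.1, t.2.2.2.1, t.2.2.2.2)) s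
        let s := (PySem.List.pyRange 0 ((PySem.List.count row (-1) : Nat) : Int) 1).foldl
          (fun (t : Int × Int × Int × Int × Int) _ => (t.1 + 9, t.2.1, t.2.2.1 + 1, t.2.2.2.1, t.2.2.2.2)) s
        let s := (PySem.List.pyRange 0 ((PySem.List.count row 2 : Nat) : Int) 1).foldl
          (fun (t : Int × Int × Int × Int × Int) _ => (t.1 - 51, t.2.1, t.2.2.1, t.2.2.2.1 + 1, t.2.2.2.2)) s
        (PySem.List.pyRange 0 ((PySem.List.count row (-2) : Nat) : Int) 1).foldl
          (fun (t : Int × Int × Int × Int × Int) _ => (t.1 + 49, t.2.1, t.2.2.1, t.2.2.2.1, t.2.2.2.2 + 1)) s)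
      (0, 0, 0, 0, 0)
    some (if s.2.1 == 0 && s.2.2.2.1 == 0 then s.1 + 8888
          else if s.2.2.1 != 0 && s.2.2.2.2 == 0 then s.1 - 8888 else s.1)
  else none

-- ===== PORT B =====
-- one pass tallying (c1, cm1, c2, cm2), then a closed-form score
def evaluatepos_alt (pos : List (List Int)) (player : Int) : Option Int :=
  let c := pos.foldl
    (fun (c : Int × Int × Int × Int) row =>
      row.foldl
        (fun (c : Int × Int × Int × Int) v =>
          if v == 1 then (c.1 + 1, c.2.1, c.2.2.1, c.2.2.2)
          else if v == -1 then (c.1, c.2.1 + 1, c.2.2.1, c.2.2.2)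
          else if v == 2 then (c.1, c.2.1, c.2.2.1 + 1, c.2.2.2)
          else if v == -2 then (c.1, c.2.1, c.2.2.1, c.2.2.2 + 1)
          else c) c)
    (0, 0, 0, 0)
  if player == 1 then
    let e := 9 * c.1 - c.2.1 + 49 * c.2.2.1 - 51 * c.2.2.2
    some (if c.1 == 0 && c.2.2.1 == 0 then e - 8888
          else if c.2.1 != 0 && c.2.2.2 == 0 then e + 8888 else e)
  else if player == -1 then
    let e := -11 * c.1 + 9 * c.2.1 - 51 * c.2.2.1 + 49 * c.2.2.2
    some (if c.1 == 0 && c.2.2.1 == 0 then e + 8888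
          else if c.2.1 != 0 && c.2.2.2 == 0 then e - 8888 else e)
  else none

-- ===== PRECONDITION & SPEC =====
def Spec_evaluatepos (pos : List (List Int)) (player : Int) (out : Option Int) : Prop := out = evaluatepos_alt pos player
instance (pos : List (List Int)) (player : Int) (out : Option Int) : Decidable (Spec_evaluatepos pos player out) := by unfold Spec_evaluatepos; infer_instance

-- ===== CLAIM (what is proved, stated in full; the proofs are below) =====
def Claim_equal_evaluatepos : Prop := ∀ (pos : List (List Int)) (player : Int), Dom_evaluatepos pos player → Spec_evaluatepos pos player (evaluatepos pos player)

-- ===== LEMMAS AND PROOFS =====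

-- total count of v over all rows
def pvTot (v : Int) (pos : List (List Int)) : Int := (pos.map (fun r => (r.count v : Int))).sum

theorem pvTot_cons (v : Int) (r : List Int) (t : List (List Int)) :
    pvTot v (r :: t) = (r.count v : Int) + pvTot v t := by
  simp [pvTot]

-- A's inner loops: a constant-increment fold adds a * length (one lemma per touched pair)
theorem pvLoopX (a : Int) (l : List Int) (s : Int × Int × Int × Int × Int) :
    l.foldl (fun (t : Int × Int × Int × Int × Int) _ => (t.1 + a, t.2.1 + 1, t.2.2.1, t.2.2.2.1, t.2.2.2.2)) s
      = (s.1 + a * l.length, s.2.1 + l.length, s.2.2.1, s.2.2.2.1, s.2.2.2.2) := by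
  induction l generalizing s with
  | nil => simp
  | cons x t ih =>
    obtain ⟨e, p, q, r, m⟩ := s
    simp only [List.foldl_cons, ih, List.length_cons]
    refine Prod.ext ?_ (Prod.ext ?_ rfl) <;> push_cast <;> ring

theorem pvLoopO (a : Int) (l : List Int) (s : Int × Int × Int × Int × Int) :
    l.foldl (fun (t : Int × Int × Int × Int × Int) _ => (t.1 + a, t.2.1, t.2.2.1 + 1, t.2.2.2.1, t.2.2.2.2)) s
      = (s.1 + a * l.length, s.2.1, s.2.2.1 + l.length, s.2.2.2.1, s.2.2.2.2) := by
  induction l generalizing s with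
  | nil => simp
  | cons x t ih =>
    obtain ⟨e, p, q, r, m⟩ := s
    simp only [List.foldl_cons, ih, List.length_cons]
    refine Prod.ext ?_ (Prod.ext rfl (Prod.ext ?_ rfl)) <;> push_cast <;> ring

theorem pvLoopW (a : Int) (l : List Int) (s : Int × Int × Int × Int × Int) :
    l.foldl (fun (t : Int × Int × Int × Int × Int) _ => (t.1 + a, t.2.1, t.2.2.1, t.2.2.2.1 + 1, t.2.2.2.2)) s
      = (s.1 + a * l.length, s.2.1, s.2.2.1, s.2.2.2.1 + l.length, s.2.2.2.2) := by
  induction l generalizing s with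
  | nil => simp
  | cons x t ih =>
    obtain ⟨e, p, q, r, m⟩ := s
    simp only [List.foldl_cons, ih, List.length_cons]
    refine Prod.ext ?_ (Prod.ext rfl (Prod.ext rfl (Prod.ext ?_ rfl))) <;> push_cast <;> ring

theorem pvLoopM (a : Int) (l : List Int) (s : Int × Int × Int × Int × Int) :
    l.foldl (fun (t : Int × Int × Int × Int × Int) _ => (t.1 + a, t.2.1, t.2.2.1, t.2.2.2.1, t.2.2.2.2 + 1)) s
      = (s.1 + a * l.length, s.2.1, s.2.2.1, s.2.2.2.1, s.2.2.2.2 + l.length) := by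
  induction l generalizing s with
  | nil => simp
  | cons x t ih =>
    obtain ⟨e, p, q, r, m⟩ := s
    simp only [List.foldl_cons, ih, List.length_cons]
    refine Prod.ext ?_ (Prod.ext rfl (Prod.ext rfl (Prod.ext rfl ?_))) <;> push_cast <;> ring

-- subtraction variants, matching the port's literal 'eval - k' bodies
theorem pvLoopXsub (a : Int) (l : List Int) (s : Int × Int × Int × Int × Int) :
    l.foldl (fun (t : Int × Int × Int × Int × Int) _ => (t.1 - a, t.2.1 + 1, t.2.2.1, t.2.2.2.1, t.2.2.2.2)) s
      = (s.1 - a * l.length, s.2.1 + l.length, s.2.2.1, s.2.2.2.1, s.2.2.2.2) := by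
  simpa only [sub_eq_add_neg, neg_mul] using pvLoopX (-a) l s

theorem pvLoopOsub (a : Int) (l : List Int) (s : Int × Int × Int × Int × Int) :
    l.foldl (fun (t : Int × Int × Int × Int × Int) _ => (t.1 - a, t.2.1, t.2.2.1 + 1, t.2.2.2.1, t.2.2.2.2)) s
      = (s.1 - a * l.length, s.2.1, s.2.2.1 + l.length, s.2.2.2.1, s.2.2.2.2) := by
  simpa only [sub_eq_add_neg, neg_mul] using pvLoopO (-a) l s

theorem pvLoopWsub (a : Int) (l : List Int) (s : Int × Int × Int × Int × Int) :
    l.foldl (fun (t : Int × Int × Int × Int × Int) _ => (t.1 - a, t.2.1, t.2.2.1, t.2.2.2.1 + 1, t.2.2.2.2)) s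
      = (s.1 - a * l.length, s.2.1, s.2.2.1, s.2.2.2.1 + l.length, s.2.2.2.2) := by
  simpa only [sub_eq_add_neg, neg_mul] using pvLoopW (-a) l s

theorem pvLoopMsub (a : Int) (l : List Int) (s : Int × Int × Int × Int × Int) :
    l.foldl (fun (t : Int × Int × Int × Int × Int) _ => (t.1 - a, t.2.1, t.2.2.1, t.2.2.2.1, t.2.2.2.2 + 1)) s
      = (s.1 - a * l.length, s.2.1, s.2.2.1, s.2.2.2.1, s.2.2.2.2 + l.length) := by
  simpa only [sub_eq_add_neg, neg_mul] using pvLoopM (-a) l s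

-- A's outer fold for player 1, characterised over the rows
theorem pvAFoldP1 (pos : List (List Int)) (s : Int × Int × Int × Int × Int) :
    pos.foldl
      (fun (s : Int × Int × Int × Int × Int) row =>
        let s := (PySem.List.pyRange 0 ((PySem.List.count row 1 : Nat) : Int) 1).foldl
          (fun (t : Int × Int × Int × Int × Int) _ => (t.1 + 9, t.2.1 + 1, t.2.2.1, t.2.2.2.1, t.2.2.2.2)) s
        let s := (PySem.List.pyRange 0 ((PySem.List.count row (-1) : Nat) : Int) 1).foldl
          (fun (t : Int × Int × Int × Int × Int) _ => (t.1 - 1, t.2.1, t.2.2.1 + 1, t.2.2.2.1, t.2.2.2.2)) s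
        let s := (PySem.List.pyRange 0 ((PySem.List.count row 2 : Nat) : Int) 1).foldl
          (fun (t : Int × Int × Int × Int × Int) _ => (t.1 + 49, t.2.1, t.2.2.1, t.2.2.2.1 + 1, t.2.2.2.2)) s
        (PySem.List.pyRange 0 ((PySem.List.count row (-2) : Nat) : Int) 1).foldl
          (fun (t : Int × Int × Int × Int × Int) _ => (t.1 - 51, t.2.1, t.2.2.1, t.2.2.2.1, t.2.2.2.2 + 1)) s)
      s
    = (s.1 + 9 * pvTot 1 pos - pvTot (-1) pos + 49 * pvTot 2 pos - 51 * pvTot (-2) pos,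
       s.2.1 + pvTot 1 pos, s.2.2.1 + pvTot (-1) pos, s.2.2.2.1 + pvTot 2 pos, s.2.2.2.2 + pvTot (-2) pos) := by
  induction pos generalizing s with
  | nil => simp [pvTot]
  | cons row t ih =>
    rw [List.foldl_cons, ih]
    simp only [pvLoopX, pvLoopOsub, pvLoopW, pvLoopMsub, PySem.List.length_pyRange_one,
      PySem.List.count_eq, Int.sub_zero, Int.toNat_natCast, pvTot_cons]
    obtain ⟨e, p, q, r, m⟩ := s
    refine Prod.ext ?_ (Prod.ext ?_ (Prod.ext ?_ (Prod.ext ?_ ?_))) <;> simp <;> push_cast <;> ring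

-- A's outer fold for player -1
theorem pvAFoldPm1 (pos : List (List Int)) (s : Int × Int × Int × Int × Int) :
    pos.foldl
      (fun (s : Int × Int × Int × Int × Int) row =>
        let s := (PySem.List.pyRange 0 ((PySem.List.count row 1 : Nat) : Int) 1).foldl
          (fun (t : Int × Int × Int × Int × Int) _ => (t.1 - 11, t.2.1 + 1, t.2.2.1, t.2.2.2.1, t.2.2.2.2)) s
        let s := (PySem.List.pyRange 0 ((PySem.List.count row (-1) : Nat) : Int) 1).foldl
          (fun (t : Int × Int × Int × Int × Int) _ => (t.1 + 9, t.2.1, t.2.2.1 + 1, t.2.2.2.1, t.2.2.2.2)) s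
        let s := (PySem.List.pyRange 0 ((PySem.List.count row 2 : Nat) : Int) 1).foldl
          (fun (t : Int × Int × Int × Int × Int) _ => (t.1 - 51, t.2.1, t.2.2.1, t.2.2.2.1 + 1, t.2.2.2.2)) s
        (PySem.List.pyRange 0 ((PySem.List.count row (-2) : Nat) : Int) 1).foldl
          (fun (t : Int × Int × Int × Int × Int) _ => (t.1 + 49, t.2.1, t.2.2.1, t.2.2.2.1, t.2.2.2.2 + 1)) s)
      s
    = (s.1 - 11 * pvTot 1 pos + 9 * pvTot (-1) pos - 51 * pvTot 2 pos + 49 * pvTot (-2) pos,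
       s.2.1 + pvTot 1 pos, s.2.2.1 + pvTot (-1) pos, s.2.2.2.1 + pvTot 2 pos, s.2.2.2.2 + pvTot (-2) pos) := by
  induction pos generalizing s with
  | nil => simp [pvTot]
  | cons row t ih =>
    rw [List.foldl_cons, ih]
    simp only [pvLoopXsub, pvLoopO, pvLoopWsub, pvLoopM, PySem.List.length_pyRange_one,
      PySem.List.count_eq, Int.sub_zero, Int.toNat_natCast, pvTot_cons]
    obtain ⟨e, p, q, r, m⟩ := s
    refine Prod.ext ?_ (Prod.ext ?_ (Prod.ext ?_ (Prod.ext ?_ ?_))) <;> simp <;> push_cast <;> ring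

-- A's indexed outer loop (range(len(pos)) + pos[sl]) reduced to the row fold, player 1
theorem pvAIdxP1 (pos : List (List Int)) :
    (PySem.List.pyRange 0 (pos.length : Int) 1).foldl
      (fun (s : Int × Int × Int × Int × Int) sl =>
        let row := PySem.List.pyGetD pos sl []
        let s := (PySem.List.pyRange 0 ((PySem.List.count row 1 : Nat) : Int) 1).foldl
          (fun (t : Int × Int × Int × Int × Int) _ => (t.1 + 9, t.2.1 + 1, t.2.2.1, t.2.2.2.1, t.2.2.2.2)) s
        let s := (PySem.List.pyRange 0 ((PySem.List.count row (-1) : Nat) : Int) 1).foldl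
          (fun (t : Int × Int × Int × Int × Int) _ => (t.1 - 1, t.2.1, t.2.2.1 + 1, t.2.2.2.1, t.2.2.2.2)) s
        let s := (PySem.List.pyRange 0 ((PySem.List.count row 2 : Nat) : Int) 1).foldl
          (fun (t : Int × Int × Int × Int × Int) _ => (t.1 + 49, t.2.1, t.2.2.1, t.2.2.2.1 + 1, t.2.2.2.2)) s
        (PySem.List.pyRange 0 ((PySem.List.count row (-2) : Nat) : Int) 1).foldl
          (fun (t : Int × Int × Int × Int × Int) _ => (t.1 - 51, t.2.1, t.2.2.1, t.2.2.2.1, t.2.2.2.2 + 1)) s)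
      (0, 0, 0, 0, 0)
    = (9 * pvTot 1 pos - pvTot (-1) pos + 49 * pvTot 2 pos - 51 * pvTot (-2) pos,
       pvTot 1 pos, pvTot (-1) pos, pvTot 2 pos, pvTot (-2) pos) := by
  refine Eq.trans (PySem.List.foldl_pyRange_zero_pyGetD' pos []
    (fun (s : Int × Int × Int × Int × Int) row =>
        let s := (PySem.List.pyRange 0 ((PySem.List.count row 1 : Nat) : Int) 1).foldl
          (fun (t : Int × Int × Int × Int × Int) _ => (t.1 + 9, t.2.1 + 1, t.2.2.1, t.2.2.2.1, t.2.2.2.2)) s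
        let s := (PySem.List.pyRange 0 ((PySem.List.count row (-1) : Nat) : Int) 1).foldl
          (fun (t : Int × Int × Int × Int × Int) _ => (t.1 - 1, t.2.1, t.2.2.1 + 1, t.2.2.2.1, t.2.2.2.2)) s
        let s := (PySem.List.pyRange 0 ((PySem.List.count row 2 : Nat) : Int) 1).foldl
          (fun (t : Int × Int × Int × Int × Int) _ => (t.1 + 49, t.2.1, t.2.2.1, t.2.2.2.1 + 1, t.2.2.2.2)) s
        (PySem.List.pyRange 0 ((PySem.List.count row (-2) : Nat) : Int) 1).foldl
          (fun (t : Int × Int × Int × Int × Int) _ => (t.1 - 51, t.2.1, t.2.2.1, t.2.2.2.1, t.2.2.2.2 + 1)) s)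
    (0, 0, 0, 0, 0)) ?_
  rw [pvAFoldP1]
  simp

-- A's indexed outer loop, player -1
theorem pvAIdxPm1 (pos : List (List Int)) :
    (PySem.List.pyRange 0 (pos.length : Int) 1).foldl
      (fun (s : Int × Int × Int × Int × Int) sl =>
        let row := PySem.List.pyGetD pos sl []
        let s := (PySem.List.pyRange 0 ((PySem.List.count row 1 : Nat) : Int) 1).foldl
          (fun (t : Int × Int × Int × Int × Int) _ => (t.1 - 11, t.2.1 + 1, t.2.2.1, t.2.2.2.1, t.2.2.2.2)) s
        let s := (PySem.List.pyRange 0 ((PySem.List.count row (-1) : Nat) : Int) 1).foldl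
          (fun (t : Int × Int × Int × Int × Int) _ => (t.1 + 9, t.2.1, t.2.2.1 + 1, t.2.2.2.1, t.2.2.2.2)) s
        let s := (PySem.List.pyRange 0 ((PySem.List.count row 2 : Nat) : Int) 1).foldl
          (fun (t : Int × Int × Int × Int × Int) _ => (t.1 - 51, t.2.1, t.2.2.1, t.2.2.2.1 + 1, t.2.2.2.2)) s
        (PySem.List.pyRange 0 ((PySem.List.count row (-2) : Nat) : Int) 1).foldl
          (fun (t : Int × Int × Int × Int × Int) _ => (t.1 + 49, t.2.1, t.2.2.1, t.2.2.2.1, t.2.2.2.2 + 1)) s)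
      (0, 0, 0, 0, 0)
    = (-11 * pvTot 1 pos + 9 * pvTot (-1) pos - 51 * pvTot 2 pos + 49 * pvTot (-2) pos,
       pvTot 1 pos, pvTot (-1) pos, pvTot 2 pos, pvTot (-2) pos) := by
  refine Eq.trans (PySem.List.foldl_pyRange_zero_pyGetD' pos []
    (fun (s : Int × Int × Int × Int × Int) row =>
        let s := (PySem.List.pyRange 0 ((PySem.List.count row 1 : Nat) : Int) 1).foldl
          (fun (t : Int × Int × Int × Int × Int) _ => (t.1 - 11, t.2.1 + 1, t.2.2.1, t.2.2.2.1, t.2.2.2.2)) s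
        let s := (PySem.List.pyRange 0 ((PySem.List.count row (-1) : Nat) : Int) 1).foldl
          (fun (t : Int × Int × Int × Int × Int) _ => (t.1 + 9, t.2.1, t.2.2.1 + 1, t.2.2.2.1, t.2.2.2.2)) s
        let s := (PySem.List.pyRange 0 ((PySem.List.count row 2 : Nat) : Int) 1).foldl
          (fun (t : Int × Int × Int × Int × Int) _ => (t.1 - 51, t.2.1, t.2.2.1, t.2.2.2.1 + 1, t.2.2.2.2)) s
        (PySem.List.pyRange 0 ((PySem.List.count row (-2) : Nat) : Int) 1).foldl
          (fun (t : Int × Int × Int × Int × Int) _ => (t.1 + 49, t.2.1, t.2.2.1, t.2.2.2.1, t.2.2.2.2 + 1)) s)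
    (0, 0, 0, 0, 0)) ?_
  rw [pvAFoldPm1]
  simp

-- B's tally over one row
theorem pvBRow (row : List Int) (c : Int × Int × Int × Int) :
    row.foldl
      (fun (c : Int × Int × Int × Int) v =>
        if v == 1 then (c.1 + 1, c.2.1, c.2.2.1, c.2.2.2)
        else if v == -1 then (c.1, c.2.1 + 1, c.2.2.1, c.2.2.2)
        else if v == 2 then (c.1, c.2.1, c.2.2.1 + 1, c.2.2.2)
        else if v == -2 then (c.1, c.2.1, c.2.2.1, c.2.2.2 + 1)
        else c) c
    = (c.1 + row.count 1, c.2.1 + row.count (-1), c.2.2.1 + row.count 2, c.2.2.2 + row.count (-2)) := by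
  induction row generalizing c with
  | nil => simp
  | cons v t ih =>
    obtain ⟨x, o, w, m⟩ := c
    simp only [List.foldl_cons]
    rw [ih]
    by_cases h1 : v = 1
    · subst h1; simp [Prod.ext_iff]; omega
    by_cases h2 : v = -1
    · subst h2; simp [Prod.ext_iff]; omega
    by_cases h3 : v = 2
    · subst h3; simp [Prod.ext_iff]; omega
    by_cases h4 : v = -2
    · subst h4; simp [Prod.ext_iff]; omega
    · have g4 : ¬(-2 : Int) = v := fun h => h4 h.symm
      simp [h1, h2, h3, h4, g4]

-- B's tally over all rows
theorem pvBFold (pos : List (List Int)) (c : Int × Int × Int × Int) :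
    pos.foldl
      (fun (c : Int × Int × Int × Int) row =>
        row.foldl
          (fun (c : Int × Int × Int × Int) v =>
            if v == 1 then (c.1 + 1, c.2.1, c.2.2.1, c.2.2.2)
            else if v == -1 then (c.1, c.2.1 + 1, c.2.2.1, c.2.2.2)
            else if v == 2 then (c.1, c.2.1, c.2.2.1 + 1, c.2.2.2)
            else if v == -2 then (c.1, c.2.1, c.2.2.1, c.2.2.2 + 1)
            else c) c) c
    = (c.1 + pvTot 1 pos, c.2.1 + pvTot (-1) pos, c.2.2.1 + pvTot 2 pos, c.2.2.2 + pvTot (-2) pos) := by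
  induction pos generalizing c with
  | nil => simp [pvTot]
  | cons row t ih =>
    rw [List.foldl_cons, pvBRow, ih]
    obtain ⟨x, o, w, m⟩ := c
    simp only [pvTot_cons]
    refine Prod.ext ?_ (Prod.ext ?_ (Prod.ext ?_ ?_)) <;> simp <;> ring

-- ===== VERDICT (by name: the statement is the Claim_ definition above) =====
theorem evaluatepos_spec : Claim_equal_evaluatepos := by
  intro pos player _
  unfold Spec_evaluatepos evaluatepos evaluatepos_alt
  rw [pvAIdxP1 pos, pvAIdxPm1 pos, pvBFold pos (0, 0, 0, 0)]
  split_ifs <;> simp_all
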